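-- pv_equiv track=rewrite | github.com/brendabaek/leetcode_s | 202508/easy/20250812_3633.py | earliestFinishTime
-- ===== SOURCE A (Python) =====
-- from typing import List
--
-- def earliestFinishTime(landStartTime: List[int], landDuration: List[int], waterStartTime: List[int], waterDuration: List[int]) -> int:
--     landEndTime, waterEndTime = [], []
--     for l1, l2 in zip(landStartTime, landDuration): landEndTime.append(l1 + l2)
--     for w1, w2 in zip(waterStartTime, waterDuration): waterEndTime.append(w1 + w2)
--     ans, ln1, ln2 = 4000, len(landEndTime), len(waterEndTime)
--     for i in range(ln1):
--         if landEndTime[i] >= ans: continue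
--         for j in range(ln2):
--             if landEndTime[i] >= waterStartTime[j]: ans = min(ans, landEndTime[i] + waterDuration[j])
--             else: ans = min(ans, waterEndTime[j])
--     for k in range(ln2):
--         if waterEndTime[k] >= ans: continue
--         for l in range(ln1):
--             if waterEndTime[k] >= landStartTime[l]: ans = min(ans, waterEndTime[k] + landDuration[l])
--             else: ans = min(ans, landEndTime[l])
--     return ans
-- ===== SOURCE B (Python) =====
-- from typing import List
--
-- def _index(pairs):
--     # sort (start, duration) pairs by start; prefix minima of durations,
--     # suffix minima of end times (start+duration)
--     sp = sorted(pairs, key=lambda p: p[0])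
--     starts = [s for s, _ in sp]
--     prefDur = []
--     m = None
--     for _, d in sp:
--         if m is None or d < m:
--             m = d
--         prefDur.append(m)
--     sufEnd = []
--     m = None
--     for s, d in reversed(sp):
--         e = s + d
--         if m is None or e < m:
--             m = e
--         sufEnd.append(m)
--     sufEnd.reverse()
--     return starts, prefDur, sufEnd
--
-- def _query(starts, prefDur, sufEnd, e):
--     # min over all tasks (s, d) of max(e, s) + d, or None if there are none
--     lo, hi = 0, len(starts)
--     while lo < hi:                 # binary search: lo = number of starts <= e
--         mid = (lo + hi) // 2
--         if starts[mid] <= e: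
--             lo = mid + 1
--         else:
--             hi = mid
--     best = None
--     if lo > 0:
--         best = e + prefDur[lo - 1]
--     if lo < len(starts) and (best is None or sufEnd[lo] < best):
--         best = sufEnd[lo]
--     return best
--
-- def earliestFinishTime(landStartTime: List[int], landDuration: List[int], waterStartTime: List[int], waterDuration: List[int]) -> int:
--     land = list(zip(landStartTime, landDuration))
--     water = list(zip(waterStartTime, waterDuration))
--     wIdx = _index(water)
--     lIdx = _index(land)
--     ans = 4000
--     for s, d in land:
--         e = s + d
--         if e < ans:
--             v = _query(*wIdx, e)
--             if v is not None and v < ans: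
--                 ans = v
--     for s, d in water:
--         e = s + d
--         if e < ans:
--             v = _query(*lIdx, e)
--             if v is not None and v < ans:
--                 ans = v
--     return ans
-- ===== Notes on version B (the rewrite author's own statement) =====
-- stated objective: alternative
-- what changed: A scans all land-water pairs with two nested index loops; B sorts each task list by start time once, builds prefix-minimum duration and suffix-minimum end-time arrays, and answers each 'best partner finish after time e' query by binary search, replacing A's O(n) inner scans by O(log n) lookups (A's ans-based pruning is kept, so B is not measurably faster on random data where that pruning already skips most inner scans).
import Mathlib
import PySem

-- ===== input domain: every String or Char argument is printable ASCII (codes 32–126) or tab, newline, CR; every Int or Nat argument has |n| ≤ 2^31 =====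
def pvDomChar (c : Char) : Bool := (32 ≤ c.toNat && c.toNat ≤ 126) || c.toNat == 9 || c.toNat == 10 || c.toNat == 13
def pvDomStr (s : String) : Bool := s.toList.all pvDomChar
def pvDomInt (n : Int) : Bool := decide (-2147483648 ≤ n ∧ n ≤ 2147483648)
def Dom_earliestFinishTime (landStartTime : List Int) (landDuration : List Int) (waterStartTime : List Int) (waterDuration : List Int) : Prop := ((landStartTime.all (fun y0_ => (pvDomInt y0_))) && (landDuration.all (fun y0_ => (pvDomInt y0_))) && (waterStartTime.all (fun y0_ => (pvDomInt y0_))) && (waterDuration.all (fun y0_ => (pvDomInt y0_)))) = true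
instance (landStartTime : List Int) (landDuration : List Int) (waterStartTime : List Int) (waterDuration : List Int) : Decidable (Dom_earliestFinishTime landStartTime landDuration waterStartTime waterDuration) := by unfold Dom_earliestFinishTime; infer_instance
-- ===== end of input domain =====

-- B replaces A's nested pair enumeration by sorted one-sided indexes (prefix-min durations /
-- suffix-min end times + binary search), keeping A's pruning scan; same return value on every input.

-- ===== PORT A =====
def earliestFinishTime (landStartTime : List Int) (landDuration : List Int) (waterStartTime : List Int) (waterDuration : List Int) : Int :=
  let landEndTime := (landStartTime.zip landDuration).map (fun p => p.1 + p.2)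
  let waterEndTime := (waterStartTime.zip waterDuration).map (fun p => p.1 + p.2)
  let ln1 : Int := landEndTime.length
  let ln2 : Int := waterEndTime.length
  let ans1 : Int := (PySem.List.pyRange 0 ln1 1).foldl (fun ans i =>
    if PySem.List.pyGetD landEndTime i 0 ≥ ans then ans
    else (PySem.List.pyRange 0 ln2 1).foldl (fun ans2 j =>
      if PySem.List.pyGetD landEndTime i 0 ≥ PySem.List.pyGetD waterStartTime j 0 then
        min ans2 (PySem.List.pyGetD landEndTime i 0 + PySem.List.pyGetD waterDuration j 0)
      else min ans2 (PySem.List.pyGetD waterEndTime j 0)) ans) 4000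
  (PySem.List.pyRange 0 ln2 1).foldl (fun ans k =>
    if PySem.List.pyGetD waterEndTime k 0 ≥ ans then ans
    else (PySem.List.pyRange 0 ln1 1).foldl (fun ans2 l =>
      if PySem.List.pyGetD waterEndTime k 0 ≥ PySem.List.pyGetD landStartTime l 0 then
        min ans2 (PySem.List.pyGetD waterEndTime k 0 + PySem.List.pyGetD landDuration l 0)
      else min ans2 (PySem.List.pyGetD landEndTime l 0)) ans) ans1

-- ===== PORT B =====
-- Source B `_index`: sort the (start, duration) pairs by start; prefix minima of the durations,
-- suffix minima of the end times (built by scanning the reversed list and reversing, as in Source B).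
def pvIndex (pairs : List (Int × Int)) : List Int × List Int × List Int :=
  let sp := PySem.List.sorted pairs (fun p => p.1) false
  let starts := sp.map (fun p => p.1)
  let prefDur := (sp.foldl (fun (acc : List Int × Option Int) p =>
      let m : Int := match acc.2 with
        | none => p.2
        | some m0 => if p.2 < m0 then p.2 else m0
      (acc.1 ++ [m], some m)) ([], none)).1
  let sufEnd := ((sp.reverse.foldl (fun (acc : List Int × Option Int) p =>
      let m : Int := match acc.2 with
        | none => p.1 + p.2
        | some m0 => if p.1 + p.2 < m0 then p.1 + p.2 else m0
      (acc.1 ++ [m], some m)) ([], none)).1).reverse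
  (starts, prefDur, sufEnd)

-- Source B `_query`'s while-loop: binary search for the number of starts ≤ e (hand-written in Source B,
-- since A imports no stdlib module providing bisect); all indices stay in range, so getD is exact.
-- the extra `fuel` argument (≥ hi - lo, structurally decreasing) only makes the loop total.
def pvBisect (starts : List Int) (e : Int) (lo hi : Nat) (fuel : Nat) : Nat :=
  match fuel with
  | 0 => lo
  | fuel' + 1 =>
    if lo < hi then
      if starts.getD ((lo + hi) / 2) 0 ≤ e then pvBisect starts e ((lo + hi) / 2 + 1) hi fuel'
      else pvBisect starts e lo ((lo + hi) / 2) fuel'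
    else lo

-- Source B `_query`: min over all tasks (s, d) of max(e, s) + d, none if there are no tasks.
def pvQuery (starts : List Int) (prefDur : List Int) (sufEnd : List Int) (e : Int) : Option Int :=
  let lo := pvBisect starts e 0 starts.length starts.length
  let best : Option Int := if 0 < lo then some (e + prefDur.getD (lo - 1) 0) else none
  if lo < starts.length then
    match best with
    | none => some (sufEnd.getD lo 0)
    | some b => if sufEnd.getD lo 0 < b then some (sufEnd.getD lo 0) else some b
  else best

def earliestFinishTime_alt (landStartTime : List Int) (landDuration : List Int) (waterStartTime : List Int) (waterDuration : List Int) : Int :=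
  let land := landStartTime.zip landDuration
  let water := waterStartTime.zip waterDuration
  let wIdx := pvIndex water
  let lIdx := pvIndex land
  let ans1 : Int := land.foldl (fun ans p =>
    let e := p.1 + p.2
    if e < ans then
      match pvQuery wIdx.1 wIdx.2.1 wIdx.2.2 e with
      | none => ans
      | some v => if v < ans then v else ans
    else ans) 4000
  water.foldl (fun ans p =>
    let e := p.1 + p.2
    if e < ans then
      match pvQuery lIdx.1 lIdx.2.1 lIdx.2.2 e with
      | none => ans
      | some v => if v < ans then v else ans
    else ans) ans1

-- ===== PRECONDITION & SPEC =====
def Spec_earliestFinishTime (landStartTime : List Int) (landDuration : List Int) (waterStartTime : List Int) (waterDuration : List Int) (out : Int) : Prop := out = earliestFinishTime_alt landStartTime landDuration waterStartTime waterDuration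
instance (landStartTime : List Int) (landDuration : List Int) (waterStartTime : List Int) (waterDuration : List Int) (out : Int) : Decidable (Spec_earliestFinishTime landStartTime landDuration waterStartTime waterDuration out) := by unfold Spec_earliestFinishTime; infer_instance

-- ===== CLAIM (what is proved, stated in full; the proofs are below) =====
def Claim_equal_earliestFinishTime : Prop := ∀ (landStartTime : List Int) (landDuration : List Int) (waterStartTime : List Int) (waterDuration : List Int), Dom_earliestFinishTime landStartTime landDuration waterStartTime waterDuration → Spec_earliestFinishTime landStartTime landDuration waterStartTime waterDuration (earliestFinishTime landStartTime landDuration waterStartTime waterDuration)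

-- ===== LEMMAS AND PROOFS =====

/-- Option-valued minimum of a list (the reference object both programs are related to). -/
def pvOMin (xs : List Int) : Option Int :=
  xs.foldl (fun a x => some (match a with | none => x | some m => min m x)) none

/-- Combining function for `pvOMin` over an append. -/
def pvOComb (a b : Option Int) : Option Int :=
  match a, b with
  | none, b => b
  | a, none => a
  | some x, some y => some (min x y)

/-- Reference running-minimum scan (spec of Source B's prefix/suffix minimum loops). -/
def pvScanMin (m? : Option Int) (xs : List Int) : List Int :=
  match xs with
  | [] => []
  | x :: t =>
    let m : Int := match m? with | none => x | some m0 => min m0 x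
    m :: pvScanMin (some m) t

theorem pvOMin_cons_aux (xs : List Int) : ∀ m : Int,
    xs.foldl (fun a x => some (match a with | none => x | some m => min m x)) (some m)
      = some (xs.foldl min m) := by
  induction xs with
  | nil => intro m; rfl
  | cons x t ih => intro m; simpa using ih (min m x)

theorem pvOMin_cons (x : Int) (xs : List Int) : pvOMin (x :: xs) = some (xs.foldl min x) := by
  simpa [pvOMin] using pvOMin_cons_aux xs x

theorem foldl_min_shift (xs : List Int) : ∀ a b : Int,
    xs.foldl min (min a b) = min a (xs.foldl min b) := by
  induction xs with
  | nil => intro a b; rfl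
  | cons x t ih => intro a b; simp [List.foldl_cons, min_assoc, ih]

theorem pvOMin_append (xs ys : List Int) : pvOMin (xs ++ ys) = pvOComb (pvOMin xs) (pvOMin ys) := by
  cases xs with
  | nil => simp [pvOMin, pvOComb]
  | cons x t =>
    cases ys with
    | nil => rw [List.append_nil, pvOMin_cons]; rfl
    | cons y u =>
      rw [List.cons_append, pvOMin_cons, pvOMin_cons, pvOMin_cons]
      show some ((t ++ y :: u).foldl min x) = pvOComb (some (t.foldl min x)) (some (u.foldl min y))
      rw [List.foldl_append, List.foldl_cons, pvOComb]
      exact congrArg some (foldl_min_shift u (t.foldl min x) y)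

theorem foldl_min_eq_pvOMin (xs : List Int) (a : Int) :
    xs.foldl min a = match pvOMin xs with | none => a | some v => min a v := by
  cases xs with
  | nil => rfl
  | cons x t =>
    rw [pvOMin_cons]
    simp only [List.foldl_cons]
    have := foldl_min_shift t a x
    simpa using this

theorem pvOMin_perm {xs ys : List Int} (h : xs.Perm ys) : pvOMin xs = pvOMin ys := by
  induction h with
  | nil => rfl
  | cons x _ ih =>
    rename_i l1 l2 _
    rw [pvOMin_cons, pvOMin_cons]
    rw [foldl_min_eq_pvOMin l1 x, foldl_min_eq_pvOMin l2 x, ih]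
  | swap x y l =>
    rw [pvOMin_cons, pvOMin_cons]
    simp only [List.foldl_cons]
    rw [foldl_min_eq_pvOMin l (min y x), foldl_min_eq_pvOMin l (min x y), min_comm x y]
  | trans _ _ ih1 ih2 => rw [ih1, ih2]

theorem foldl_min_map_add (e : Int) (xs : List Int) : ∀ a : Int,
    (xs.map (fun x => e + x)).foldl min (e + a) = e + xs.foldl min a := by
  induction xs with
  | nil => intro a; rfl
  | cons x t ih => intro a; simp only [List.map_cons, List.foldl_cons, min_add_add_left]; exact ih (min a x)

theorem pvOMin_map_add (e : Int) (xs : List Int) :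
    pvOMin (xs.map (fun x => e + x)) = (pvOMin xs).map (fun x => e + x) := by
  cases xs with
  | nil => rfl
  | cons x t =>
    rw [List.map_cons, pvOMin_cons, pvOMin_cons]
    simp only [Option.map_some]
    exact congrArg some (foldl_min_map_add e t x)

/-- The prefix-minimum building loop of Source B produces `pvScanMin`. -/
theorem fold_scanMin {α : Type} (f : α → Int) :
    ∀ (l : List α) (acc : List Int) (m? : Option Int),
    (l.foldl (fun (a : List Int × Option Int) p =>
        let m : Int := match a.2 with
          | none => f p
          | some m0 => if f p < m0 then f p else m0
        (a.1 ++ [m], some m)) (acc, m?)).1 = acc ++ pvScanMin m? (l.map f) := by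
  intro l
  induction l with
  | nil => intro acc m?; simp [pvScanMin]
  | cons p t ih =>
    intro acc m?
    have hm : (match m? with | none => f p | some m0 => if f p < m0 then f p else m0)
        = (match m? with | none => f p | some m0 => min m0 (f p)) := by
      cases m? with
      | none => rfl
      | some m0 => simp only [min_def]; split_ifs <;> omega
    simp only [List.foldl_cons, List.map_cons, pvScanMin]
    rw [hm, ih]
    simp [List.append_assoc]

theorem pvScanMin_length (m? : Option Int) (xs : List Int) : (pvScanMin m? xs).length = xs.length := by
  induction xs generalizing m? with
  | nil => rfl
  | cons x t ih => simp [pvScanMin, ih]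

/-- Elements of the scan are minima of prefixes (together with the carried minimum). -/
theorem pvScanMin_getD (xs : List Int) : ∀ (m? : Option Int) (t : Nat), t < xs.length →
    some ((pvScanMin m? xs).getD t 0) = pvOMin (m?.toList ++ xs.take (t + 1)) := by
  induction xs with
  | nil => intro m? t ht; simp at ht
  | cons x xs' ih =>
    intro m? t ht
    obtain ⟨m1, hm1⟩ : ∃ m1 : Int, (match m? with | none => x | some m0 => min m0 x) = m1 := ⟨_, rfl⟩
    have hm : some m1 = pvOMin (m?.toList ++ [x]) := by
      cases m? with
      | none => simp [← hm1, pvOMin_cons]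
      | some m0 => simp [← hm1, pvOMin_cons]
    cases t with
    | zero =>
      simpa [pvScanMin, hm1, List.take] using hm
    | succ k =>
      have hk : k < xs'.length := by simpa using Nat.lt_of_succ_lt_succ ht
      simp only [pvScanMin, hm1, List.getD_cons_succ]
      rw [ih (some m1) k hk]
      have hsplit : (m?.toList ++ List.take (k + 1 + 1) (x :: xs') : List Int)
          = (m?.toList ++ [x]) ++ List.take (k + 1) xs' := by simp
      rw [hsplit, pvOMin_append, pvOMin_append (m?.toList ++ [x]), ← hm]
      rfl

theorem pvBisect_spec (starts : List Int) (e : Int)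
    (hs : ∀ i j : Nat, i ≤ j → j < starts.length → starts.getD i 0 ≤ starts.getD j 0) :
    ∀ (fuel lo hi : Nat), hi - lo ≤ fuel → lo ≤ hi → hi ≤ starts.length →
    (∀ i : Nat, i < lo → starts.getD i 0 ≤ e) →
    (∀ i : Nat, hi ≤ i → i < starts.length → e < starts.getD i 0) →
    lo ≤ pvBisect starts e lo hi fuel ∧ pvBisect starts e lo hi fuel ≤ hi ∧
    (∀ i : Nat, i < pvBisect starts e lo hi fuel → starts.getD i 0 ≤ e) ∧
    (∀ i : Nat, pvBisect starts e lo hi fuel ≤ i → i < starts.length → e < starts.getD i 0) := by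
  intro fuel
  induction fuel with
  | zero =>
    intro lo hi hf hlh hhl hlow hhigh
    have hres : pvBisect starts e lo hi 0 = lo := rfl
    rw [hres]
    exact ⟨le_refl _, hlh, hlow, fun i h1 h2 => hhigh i (by omega) h2⟩
  | succ fuel' ihn =>
    intro lo hi hf hlh hhl hlow hhigh
    have hres : pvBisect starts e lo hi (fuel' + 1)
        = if lo < hi then
            (if starts.getD ((lo + hi) / 2) 0 ≤ e then pvBisect starts e ((lo + hi) / 2 + 1) hi fuel'
             else pvBisect starts e lo ((lo + hi) / 2) fuel')
          else lo := rfl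
    rw [hres]
    by_cases h : lo < hi
    · rw [if_pos h]
      by_cases hc : starts.getD ((lo + hi) / 2) 0 ≤ e
      · rw [if_pos hc]
        have hres2 := ihn ((lo + hi) / 2 + 1) hi (by omega) (by omega) hhl
          (fun i hi' => by
            have : i ≤ (lo + hi) / 2 := by omega
            exact le_trans (hs i ((lo + hi) / 2) this (by omega)) hc)
          hhigh
        exact ⟨by omega, hres2.2.1, hres2.2.2.1, hres2.2.2.2⟩
      · rw [if_neg hc]
        have he : e < starts.getD ((lo + hi) / 2) 0 := lt_of_not_ge hc
        have hres2 := ihn lo ((lo + hi) / 2) (by omega) (by omega) (by omega) hlow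
          (fun i hi1 hi2 => lt_of_lt_of_le he (hs ((lo + hi) / 2) i hi1 hi2))
        exact ⟨hres2.1, by omega, hres2.2.2.1, hres2.2.2.2⟩
    · rw [if_neg h]
      exact ⟨le_refl _, by omega, hlow, fun i h1 h2 => hhigh i (by omega) h2⟩

/-- A's inner loop over one task list is a running minimum of `max(e, s) + d`. -/
theorem innerA_eq (zs : List (Int × Int)) (e ans : Int) :
    zs.foldl (fun a p => if e ≥ p.1 then min a (e + p.2) else min a (p.1 + p.2)) ans
      = match pvOMin (zs.map (fun p => max e p.1 + p.2)) with
        | none => ans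
        | some v => min ans v := by
  have hb : (fun (a : Int) (p : Int × Int) => if e ≥ p.1 then min a (e + p.2) else min a (p.1 + p.2))
      = fun a p => min a (max e p.1 + p.2) := by
    funext a p
    by_cases h : e ≥ p.1
    · rw [if_pos h, max_eq_left h]
    · rw [if_neg h, max_eq_right (le_of_lt (lt_of_not_ge h))]
  rw [hb, ← List.foldl_map (f := fun p : Int × Int => max e p.1 + p.2) (g := min)]
  exact foldl_min_eq_pvOMin _ ans

/-- Source B's `_query` over the index of `pairs` computes the minimum of `max(e, s) + d`. -/
theorem pvQuery_eq (pairs : List (Int × Int)) (e : Int) :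
    pvQuery (pvIndex pairs).1 (pvIndex pairs).2.1 (pvIndex pairs).2.2 e
      = pvOMin (pairs.map (fun p => max e p.1 + p.2)) := by
  set sp := PySem.List.sorted pairs (fun p => p.1) false with hsp
  have hperm : sp.Perm pairs := PySem.List.sorted_perm pairs (fun p => p.1) false
  have h1 : (pvIndex pairs).1 = sp.map (fun q => q.1) := rfl
  have h2 : (pvIndex pairs).2.1 = pvScanMin none (sp.map (fun q => q.2)) := by
    show (sp.foldl _ ([], none)).1 = _
    simpa using fold_scanMin (fun q : Int × Int => q.2) sp [] none
  have h3 : (pvIndex pairs).2.2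
      = (pvScanMin none (sp.reverse.map (fun q => q.1 + q.2))).reverse := by
    show ((sp.reverse.foldl _ ([], none)).1).reverse = _
    congr 1
    simpa using fold_scanMin (fun q : Int × Int => q.1 + q.2) sp.reverse [] none
  set starts := sp.map (fun q => q.1) with hst
  have hslen : starts.length = sp.length := by simp [hst]
  have hpairwise : starts.Pairwise (· ≤ ·) := by
    have h := PySem.List.sorted_pairwise pairs (fun q => q.1)
    rw [hst, List.pairwise_map]
    exact h
  have hs : ∀ i j : Nat, i ≤ j → j < starts.length → starts.getD i 0 ≤ starts.getD j 0 := by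
    intro i j hij hj
    rcases Nat.eq_or_lt_of_le hij with rfl | hlt
    · exact le_refl _
    · rw [List.getD_eq_getElem _ _ (lt_of_le_of_lt hij hj), List.getD_eq_getElem _ _ hj]
      exact List.pairwise_iff_getElem.1 hpairwise i j _ _ hlt
  obtain ⟨hp0, hp1, hple, hpgt⟩ := pvBisect_spec starts e hs starts.length 0 starts.length
    (by omega) (Nat.zero_le _) (le_refl _) (fun i h => absurd h (Nat.not_lt_zero i))
    (fun i h1 h2 => absurd (Nat.lt_of_le_of_lt h1 h2) (Nat.lt_irrefl _))
  set pp := pvBisect starts e 0 starts.length starts.length with hppdef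
  -- getD view of starts entries
  have hgd : ∀ (k : Nat) (hk : k < sp.length), starts.getD k 0 = (sp[k]'hk).1 := by
    intro k hk
    have hk2 : k < starts.length := by rw [hslen]; exact hk
    rw [List.getD_eq_getElem _ _ hk2]
    simp [hst]
  have htake : ∀ q ∈ sp.take pp, q.1 ≤ e := by
    intro q hq
    obtain ⟨i, hi, hqe⟩ := List.mem_iff_getElem.1 hq
    have hi2 : i < pp ∧ i < sp.length := by
      have := hi
      simp [List.length_take] at this
      omega
    have := hple i hi2.1
    rw [hgd i hi2.2] at this
    rw [← hqe, List.getElem_take]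
    exact this
  have hdrop : ∀ q ∈ sp.drop pp, e < q.1 := by
    intro q hq
    obtain ⟨i, hi, hqe⟩ := List.mem_iff_getElem.1 hq
    have hi2 : pp + i < sp.length := by
      have := hi
      simp [List.length_drop] at this
      omega
    have := hpgt (pp + i) (by omega) (by omega)
    rw [hgd (pp + i) hi2] at this
    rw [← hqe, List.getElem_drop]
    exact this
  -- right-hand side, split at position pp
  have hR : pvOMin (pairs.map (fun q => max e q.1 + q.2))
      = pvOComb (pvOMin ((sp.take pp).map (fun q => max e q.1 + q.2)))
                (pvOMin ((sp.drop pp).map (fun q => max e q.1 + q.2))) := by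
    rw [← pvOMin_append, ← List.map_append, List.take_append_drop]
    exact (pvOMin_perm (hperm.map _)).symm
  have htm : (sp.take pp).map (fun q => max e q.1 + q.2)
      = ((sp.take pp).map (fun q => q.2)).map (fun x => e + x) := by
    rw [List.map_map]
    exact List.map_congr_left (fun q hq => by
      rw [max_eq_left (htake q hq)]; rfl)
  have hdm : (sp.drop pp).map (fun q => max e q.1 + q.2)
      = (sp.drop pp).map (fun q => q.1 + q.2) :=
    List.map_congr_left (fun q hq => by rw [max_eq_right (le_of_lt (hdrop q hq))])
  -- the `best` value is the take-side minimum
  have hpref : (if 0 < pp then some (e + (pvScanMin none (sp.map (fun q => q.2))).getD (pp - 1) 0) else none)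
      = pvOMin ((sp.take pp).map (fun q => max e q.1 + q.2)) := by
    rw [htm]
    by_cases hp : 0 < pp
    · rw [if_pos hp]
      have hlt : pp - 1 < (sp.map (fun q => q.2)).length := by
        rw [List.length_map]; omega
      have hscan := pvScanMin_getD (sp.map (fun q => q.2)) none (pp - 1) hlt
      simp only [Option.toList, List.nil_append] at hscan
      rw [pvOMin_map_add]
      rw [show (sp.take pp).map (fun q => q.2) = (sp.map (fun q => q.2)).take pp from List.map_take]
      rw [show pp - 1 + 1 = pp from by omega] at hscan
      rw [← hscan]
      rfl
    · rw [if_neg hp]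
      have hz : pp = 0 := by omega
      simp [hz, pvOMin]
  -- the suffix entry is the drop-side minimum
  have hsuf : pp < sp.length →
      some (((pvScanMin none (sp.reverse.map (fun q => q.1 + q.2))).reverse).getD pp 0)
        = pvOMin ((sp.drop pp).map (fun q => q.1 + q.2)) := by
    intro hplen
    set rs := sp.reverse.map (fun q => q.1 + q.2) with hrs
    have hrslen : rs.length = sp.length := by simp [hrs]
    have hscanlen : (pvScanMin none rs).length = sp.length := by
      rw [pvScanMin_length, hrslen]
    have hrev : ((pvScanMin none rs).reverse).getD pp 0
        = (pvScanMin none rs).getD (sp.length - 1 - pp) 0 := by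
      rw [List.getD_eq_getElem _ _ (by simp [hscanlen]; omega),
          List.getD_eq_getElem _ _ (by rw [hscanlen]; omega)]
      rw [List.getElem_reverse]
      congr 1
      omega
    rw [hrev]
    have hscan := pvScanMin_getD rs none (sp.length - 1 - pp) (by rw [hrslen]; omega)
    simp only [Option.toList, List.nil_append] at hscan
    rw [hscan, show sp.length - 1 - pp + 1 = sp.length - pp by omega]
    have hts : rs.take (sp.length - pp) = ((sp.drop pp).map (fun q => q.1 + q.2)).reverse := by
      rw [hrs, ← List.map_take, List.take_reverse,
          show sp.length - (sp.length - pp) = pp by omega, List.map_reverse]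
    rw [hts]
    exact pvOMin_perm ((sp.drop pp).map (fun q => q.1 + q.2)).reverse_perm
  -- assemble
  rw [hR, hdm]
  simp only [pvQuery, h1, h2, h3, ← hppdef]
  by_cases hplt : pp < starts.length
  · rw [if_pos hplt]
    have hplen : pp < sp.length := by rw [← hslen]; exact hplt
    by_cases hp : 0 < pp
    · rw [if_pos hp] at hpref ⊢
      rw [← hpref, ← hsuf hplen]
      show (if _ < _ then _ else _) = pvOComb (some _) (some _)
      simp only [pvOComb]
      split_ifs with hcmp <;> simp only [Option.some.injEq] <;> omega
    · rw [if_neg hp] at hpref ⊢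
      rw [← hpref, ← hsuf hplen]
      rfl
  · rw [if_neg hplt]
    have hpe : pp = sp.length := by omega
    have hde : sp.drop pp = [] := by
      rw [hpe]; exact List.drop_length
    rw [← hpref, hde]
    simp only [List.map_nil]
    cases hc : (if 0 < pp then some (e + (pvScanMin none (sp.map (fun q => q.2))).getD (pp - 1) 0) else none) <;>
      rfl

/-- A's inner index loop equals the reference running minimum (for every query value `e`). -/
theorem innerBridge (yS yD : List Int) (e ans : Int) :
    (PySem.List.pyRange 0 ((((yS.zip yD).map (fun p => p.1 + p.2)).length : Int)) 1).foldl
      (fun ans2 j =>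
        if e ≥ PySem.List.pyGetD yS j 0 then
          min ans2 (e + PySem.List.pyGetD yD j 0)
        else min ans2 (PySem.List.pyGetD ((yS.zip yD).map (fun p => p.1 + p.2)) j 0)) ans
    = match pvOMin ((yS.zip yD).map (fun q => max e q.1 + q.2)) with
      | none => ans
      | some v => min ans v := by
  set zs := yS.zip yD with hzs
  set yEnd := zs.map (fun p => p.1 + p.2) with hyEnd
  set W := yEnd.zip zs with hW
  have hzsy : zs.length ≤ yS.length := by rw [hzs]; simp [List.length_zip]
  have hzsd : zs.length ≤ yD.length := by rw [hzs]; simp [List.length_zip]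
  have hyElen : yEnd.length = zs.length := by simp [hyEnd]
  have hWlen : W.length = yEnd.length := by simp [hW, hyElen]
  have hlen2 : ((yEnd.length : Int)) = ((W.length : Int)) := by rw [hWlen]
  rw [hlen2]
  have hstep : ∀ (a : Int), ∀ j ∈ PySem.List.pyRange 0 ((W.length : Int)) 1,
      (if e ≥ PySem.List.pyGetD yS j 0 then min a (e + PySem.List.pyGetD yD j 0)
       else min a (PySem.List.pyGetD yEnd j 0))
      = (if e ≥ (PySem.List.pyGetD W j ((0 : Int), (0 : Int), (0 : Int))).2.1
         then min a (e + (PySem.List.pyGetD W j ((0 : Int), (0 : Int), (0 : Int))).2.2)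
         else min a ((PySem.List.pyGetD W j ((0 : Int), (0 : Int), (0 : Int))).1)) := by
    intro a j hj
    obtain ⟨hj0, hj1⟩ := PySem.List.mem_pyRange_one.1 hj
    have hj2 : j < (zs.length : Int) := by rw [hWlen, hyElen] at hj1; exact hj1
    have hjn : j.toNat < zs.length := by omega
    rw [PySem.List.pyGetD_eq_getElem W _ hj0 (by exact_mod_cast hj1),
        PySem.List.pyGetD_eq_getElem yS _ hj0 (by omega),
        PySem.List.pyGetD_eq_getElem yD _ hj0 (by omega),
        PySem.List.pyGetD_eq_getElem yEnd _ hj0 (by rw [← hyElen] at hj2; exact hj2)]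
    simp [hW, hyEnd, hzs, List.getElem_zip]
  have e1 := PySem.List.foldl_congr_mem (PySem.List.pyRange 0 ((W.length : Int)) 1)
    (fun (ans2 : Int) (j : Int) =>
      if e ≥ PySem.List.pyGetD yS j 0 then min ans2 (e + PySem.List.pyGetD yD j 0)
      else min ans2 (PySem.List.pyGetD yEnd j 0))
    (fun (acc : Int) (j : Int) =>
      (fun (a2 : Int) (t : Int × Int × Int) =>
        if e ≥ t.2.1 then min a2 (e + t.2.2) else min a2 t.1)
        acc (PySem.List.pyGetD W j ((0 : Int), (0 : Int), (0 : Int))))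
    ans (fun a j hj => hstep a j hj)
  have e2 := PySem.List.foldl_pyRange_zero_pyGetD' W ((0 : Int), (0 : Int), (0 : Int))
    (fun (a2 : Int) (t : Int × Int × Int) =>
      if e ≥ t.2.1 then min a2 (e + t.2.2) else min a2 t.1) ans
  have hWm : W = zs.map (fun q => (q.1 + q.2, q)) := by
    rw [hW, hyEnd]
    calc (zs.map (fun p => p.1 + p.2)).zip zs
        = (zs.map (fun p => p.1 + p.2)).zip (zs.map id) := by rw [List.map_id]
      _ = zs.map (fun q => (q.1 + q.2, id q)) := List.zip_map'
      _ = zs.map (fun q => (q.1 + q.2, q)) := rfl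
  have e3 : W.foldl (fun (a2 : Int) (t : Int × Int × Int) =>
        if e ≥ t.2.1 then min a2 (e + t.2.2) else min a2 t.1) ans
      = zs.foldl (fun a q => if e ≥ q.1 then min a (e + q.2) else min a (q.1 + q.2)) ans := by
    rw [hWm, List.foldl_map]
  exact e1.trans (e2.trans (e3.trans (innerA_eq zs e ans)))

/-- One of A's two symmetric passes equals the corresponding pass of B. -/
theorem loop_bridge (xS xD yS yD : List Int) (init : Int) :
    (PySem.List.pyRange 0 ((((xS.zip xD).map (fun p => p.1 + p.2)).length : Int)) 1).foldl
      (fun ans i =>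
        if PySem.List.pyGetD ((xS.zip xD).map (fun p => p.1 + p.2)) i 0 ≥ ans then ans
        else (PySem.List.pyRange 0 ((((yS.zip yD).map (fun p => p.1 + p.2)).length : Int)) 1).foldl
          (fun ans2 j =>
            if PySem.List.pyGetD ((xS.zip xD).map (fun p => p.1 + p.2)) i 0 ≥ PySem.List.pyGetD yS j 0 then
              min ans2 (PySem.List.pyGetD ((xS.zip xD).map (fun p => p.1 + p.2)) i 0 + PySem.List.pyGetD yD j 0)
            else min ans2 (PySem.List.pyGetD ((yS.zip yD).map (fun p => p.1 + p.2)) j 0)) ans) init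
    = (xS.zip xD).foldl (fun ans p =>
        if p.1 + p.2 < ans then
          match pvQuery (pvIndex (yS.zip yD)).1 (pvIndex (yS.zip yD)).2.1 (pvIndex (yS.zip yD)).2.2 (p.1 + p.2) with
          | none => ans
          | some v => if v < ans then v else ans
        else ans) init := by
  set xEnd := (xS.zip xD).map (fun p => p.1 + p.2) with hxEnd
  have hfun : (fun (ans : Int) (i : Int) =>
      if PySem.List.pyGetD xEnd i 0 ≥ ans then ans
      else (PySem.List.pyRange 0 ((((yS.zip yD).map (fun p => p.1 + p.2)).length : Int)) 1).foldl
        (fun ans2 j =>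
          if PySem.List.pyGetD xEnd i 0 ≥ PySem.List.pyGetD yS j 0 then
            min ans2 (PySem.List.pyGetD xEnd i 0 + PySem.List.pyGetD yD j 0)
          else min ans2 (PySem.List.pyGetD ((yS.zip yD).map (fun p => p.1 + p.2)) j 0)) ans)
      = fun (ans : Int) (i : Int) =>
        (fun (a : Int) (le : Int) =>
          if le ≥ a then a
          else match pvOMin ((yS.zip yD).map (fun q => max le q.1 + q.2)) with
            | none => a
            | some v => min a v) ans (PySem.List.pyGetD xEnd i 0) := by
    funext ans i
    by_cases h : PySem.List.pyGetD xEnd i 0 ≥ ans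
    · rw [if_pos h]; exact (if_pos h).symm
    · rw [if_neg h, innerBridge yS yD (PySem.List.pyGetD xEnd i 0) ans]
      exact (if_neg h).symm
  rw [hfun]
  have e2 := PySem.List.foldl_pyRange_zero_pyGetD' xEnd (0 : Int)
    (fun (a : Int) (le : Int) =>
      if le ≥ a then a
      else match pvOMin ((yS.zip yD).map (fun q => max le q.1 + q.2)) with
        | none => a
        | some v => min a v) init
  have e3 : xEnd.foldl (fun (a : Int) (le : Int) =>
      if le ≥ a then a
      else match pvOMin ((yS.zip yD).map (fun q => max le q.1 + q.2)) with
        | none => a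
        | some v => min a v) init
      = (xS.zip xD).foldl (fun a q =>
          if q.1 + q.2 ≥ a then a
          else match pvOMin ((yS.zip yD).map (fun r => max (q.1 + q.2) r.1 + r.2)) with
            | none => a
            | some v => min a v) init := by
    rw [hxEnd, List.foldl_map]
  have e4 : (xS.zip xD).foldl (fun a q =>
        if q.1 + q.2 ≥ a then a
        else match pvOMin ((yS.zip yD).map (fun r => max (q.1 + q.2) r.1 + r.2)) with
          | none => a
          | some v => min a v) init
      = (xS.zip xD).foldl (fun ans p =>
          if p.1 + p.2 < ans then
            match pvQuery (pvIndex (yS.zip yD)).1 (pvIndex (yS.zip yD)).2.1 (pvIndex (yS.zip yD)).2.2 (p.1 + p.2) with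
            | none => ans
            | some v => if v < ans then v else ans
          else ans) init := by
    have hb : (fun (a : Int) (q : Int × Int) =>
        if q.1 + q.2 ≥ a then a
        else match pvOMin ((yS.zip yD).map (fun r => max (q.1 + q.2) r.1 + r.2)) with
          | none => a
          | some v => min a v)
        = fun (ans : Int) (p : Int × Int) =>
          if p.1 + p.2 < ans then
            match pvQuery (pvIndex (yS.zip yD)).1 (pvIndex (yS.zip yD)).2.1 (pvIndex (yS.zip yD)).2.2 (p.1 + p.2) with
            | none => ans
            | some v => if v < ans then v else ans
          else ans := by
      funext a q
      rw [pvQuery_eq (yS.zip yD) (q.1 + q.2)]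
      by_cases h : q.1 + q.2 < a
      · rw [if_pos h, if_neg (not_le.2 h)]
        cases pvOMin ((yS.zip yD).map (fun r => max (q.1 + q.2) r.1 + r.2)) with
        | none => rfl
        | some v => show min a v = if v < a then v else a; omega
      · rw [if_neg h, if_pos (not_lt.1 h)]
    rw [hb]
  exact e2.trans (e3.trans e4)

theorem main_eq (landStartTime landDuration waterStartTime waterDuration : List Int) :
    earliestFinishTime landStartTime landDuration waterStartTime waterDuration
      = earliestFinishTime_alt landStartTime landDuration waterStartTime waterDuration := by
  simp only [earliestFinishTime, earliestFinishTime_alt]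
  rw [loop_bridge landStartTime landDuration waterStartTime waterDuration 4000,
      loop_bridge waterStartTime waterDuration landStartTime landDuration _]

-- ===== VERDICT (by name: the statement is the Claim_ definition above) =====
theorem earliestFinishTime_spec : Claim_equal_earliestFinishTime := by
  intro lS lD wS wD _
  unfold Spec_earliestFinishTime
  exact main_eq lS lD wS wD
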